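-- pv_equiv track=rewrite | github.com/liusska/Python-Advanced | 05.FUNCTIONS ADVANCED/lab/08.Expressions.py | expressions
-- ===== SOURCE A (Python) =====
-- def expressions(numbers, current_result=0, expression=''):
--     if not numbers:
--         return [(expression, current_result)]
--     result_plus = expressions(
--         numbers[1:],
--         current_result + numbers[0],
--         f'{expression}+{numbers[0]}')
--     result_minus = expressions(
--         numbers[1:],
--         current_result - numbers[0],
--         f'{expression}-{numbers[0]}')
--     return result_plus + result_minus
-- ===== SOURCE B (Python) =====
-- def expressions(numbers, current_result=0, expression=''):
--     results = [(expression, current_result)]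
--     for n in numbers:
--         s = str(n)
--         results = [t for e, v in results
--                      for t in ((e + '+' + s, v + n), (e + '-' + s, v - n))]
--     return results
-- ===== Notes on version B (the rewrite author's own statement) =====
-- stated objective: alternative
-- what changed: Replaced the binary plus/minus recursion by a single iterative loop that expands a list of partial (expression, value) pairs level by level.
import Mathlib
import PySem

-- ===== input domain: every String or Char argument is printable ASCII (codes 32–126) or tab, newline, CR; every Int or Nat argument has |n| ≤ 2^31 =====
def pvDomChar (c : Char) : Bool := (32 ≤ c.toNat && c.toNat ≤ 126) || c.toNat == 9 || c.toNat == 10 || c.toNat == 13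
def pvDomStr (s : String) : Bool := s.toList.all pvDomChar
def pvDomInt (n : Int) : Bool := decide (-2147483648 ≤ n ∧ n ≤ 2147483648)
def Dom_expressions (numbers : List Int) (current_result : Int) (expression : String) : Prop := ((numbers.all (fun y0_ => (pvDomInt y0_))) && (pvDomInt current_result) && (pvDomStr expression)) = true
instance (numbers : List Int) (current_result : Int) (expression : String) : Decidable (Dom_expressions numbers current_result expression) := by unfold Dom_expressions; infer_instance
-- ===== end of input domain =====

-- B replaces A's binary recursion by an iterative level-by-level expansion: a single loop
-- over numbers that doubles the list of partial (expression, value) pairs each step.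
-- ===== PORT A =====
def expressions (numbers : List Int) (current_result : Int) (expression : String) : List (String × Int) :=
  match numbers with
  | [] => [(expression, current_result)]
  | n :: ns =>
      let result_plus := expressions ns (current_result + n) (expression ++ "+" ++ PySem.Int.toStr n)
      let result_minus := expressions ns (current_result - n) (expression ++ "-" ++ PySem.Int.toStr n)
      result_plus ++ result_minus

-- ===== PORT B =====
-- one expansion step of B's loop body (the comprehension over results for one number n)
def pvStep (results : List (String × Int)) (n : Int) : List (String × Int) :=
  results.flatMap (fun p =>
    [(p.1 ++ "+" ++ PySem.Int.toStr n, p.2 + n),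
     (p.1 ++ "-" ++ PySem.Int.toStr n, p.2 - n)])

def expressions_alt (numbers : List Int) (current_result : Int) (expression : String) : List (String × Int) :=
  numbers.foldl pvStep [(expression, current_result)]

-- ===== PRECONDITION & SPEC =====
def Spec_expressions (numbers : List Int) (current_result : Int) (expression : String) (out : List (String × Int)) : Prop := out = expressions_alt numbers current_result expression
instance (numbers : List Int) (current_result : Int) (expression : String) (out : List (String × Int)) : Decidable (Spec_expressions numbers current_result expression out) := by unfold Spec_expressions; infer_instance

-- ===== CLAIM (what is proved, stated in full; the proofs are below) =====
def Claim_equal_expressions : Prop := ∀ (numbers : List Int) (current_result : Int) (expression : String), Dom_expressions numbers current_result expression → Spec_expressions numbers current_result expression (expressions numbers current_result expression)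

-- ===== LEMMAS AND PROOFS =====

-- ===== VERDICT (by name: the statement is the Claim_ definition above) =====
theorem foldl_pvStep_append (ns : List Int) (xs ys : List (String × Int)) :
    ns.foldl pvStep (xs ++ ys) = ns.foldl pvStep xs ++ ns.foldl pvStep ys := by
  induction ns generalizing xs ys with
  | nil => rfl
  | cons n ns ih =>
    simp only [List.foldl_cons, pvStep, List.flatMap_append, ih]

theorem expressions_eq_alt (numbers : List Int) (c : Int) (e : String) :
    expressions numbers c e = expressions_alt numbers c e := by
  induction numbers generalizing c e with
  | nil => rfl
  | cons n ns ih =>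
    rw [expressions]
    simp only [ih, expressions_alt, List.foldl_cons]
    rw [show pvStep [(e, c)] n =
        [(e ++ "+" ++ PySem.Int.toStr n, c + n)] ++ [(e ++ "-" ++ PySem.Int.toStr n, c - n)] from rfl,
      foldl_pvStep_append]

theorem expressions_spec : Claim_equal_expressions := by
  intro numbers c e _
  unfold Spec_expressions
  exact expressions_eq_alt numbers c e
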